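-- pv_equiv track=rewrite | github.com/RevansChen/online-judge | Codewars/8kyu/whats-up-next/Python/solution1.py | next_item
-- ===== SOURCE A (Python) =====
-- def next_item(xs, item):
--     try:
--         it = iter(xs)
--         for e in it:
--             if e == item:
--                 return next(it)
--     except:
--         pass
--     return None
-- ===== SOURCE B (Python) =====
-- def next_item(xs, item):
--     try:
--         result = None
--         prev = None
--         for e in reversed(list(xs)):
--             if e == item:
--                 result = prev
--             prev = e
--         return result
--     except:
--         return None
-- ===== Notes on version B (the rewrite author's own statement) =====
-- stated objective: alternative
-- what changed: Traverses the list back-to-front with an overwrite accumulator (prev/result) instead of A's forward scan with early return and iterator consumption; the leftmost match is processed last, so its successor survives.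
import Mathlib
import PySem

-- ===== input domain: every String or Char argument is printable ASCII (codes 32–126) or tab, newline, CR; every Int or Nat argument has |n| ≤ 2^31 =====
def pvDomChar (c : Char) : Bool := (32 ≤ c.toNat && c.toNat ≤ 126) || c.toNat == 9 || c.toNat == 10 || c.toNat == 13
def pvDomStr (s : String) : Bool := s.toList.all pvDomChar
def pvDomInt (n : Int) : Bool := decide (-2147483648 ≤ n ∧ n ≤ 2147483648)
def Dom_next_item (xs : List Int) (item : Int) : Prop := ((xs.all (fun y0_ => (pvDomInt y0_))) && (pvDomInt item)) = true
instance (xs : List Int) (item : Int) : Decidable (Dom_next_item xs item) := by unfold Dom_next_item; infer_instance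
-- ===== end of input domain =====

-- B replaces A's forward early-return scan by a back-to-front traversal with an
-- overwrite accumulator (objective: alternative, same cost).


-- ===== PORT A =====
-- A consumes an iterator: on a match it returns next(it); at the end of the
-- list next(it) raises StopIteration (caught, yielding None) = rest.head? here.
def next_item (xs : List Int) (item : Int) : Option Int :=
  match xs with
  | [] => none
  | e :: rest => if e == item then rest.head? else next_item rest item

-- ===== PORT B =====
-- B folds over xs.reverse with state (result, prev); on a match result is
-- overwritten with prev (the element to the right in xs), so the leftmost
-- match, processed last, wins.
def next_item_alt (xs : List Int) (item : Int) : Option Int :=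
  (xs.reverse.foldl
    (fun (s : Option Int × Option Int) e =>
      (if e == item then s.2 else s.1, some e))
    (none, none)).1

-- ===== PRECONDITION & SPEC =====
def Spec_next_item (xs : List Int) (item : Int) (out : Option Int) : Prop := out = next_item_alt xs item
instance (xs : List Int) (item : Int) (out : Option Int) : Decidable (Spec_next_item xs item out) := by unfold Spec_next_item; infer_instance

-- ===== CLAIM (what is proved, stated in full; the proofs are below) =====
def Claim_equal_next_item : Prop := ∀ (xs : List Int) (item : Int), Dom_next_item xs item → Spec_next_item xs item (next_item xs item)

-- ===== LEMMAS AND PROOFS =====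
theorem fold_state (xs : List Int) (item : Int) :
    xs.reverse.foldl
      (fun (s : Option Int × Option Int) e =>
        (if e == item then s.2 else s.1, some e))
      (none, none) = (next_item xs item, xs.head?) := by
  induction xs with
  | nil => rfl
  | cons e rest ih =>
    simp only [List.reverse_cons, List.foldl_append, ih, List.foldl_cons, List.foldl_nil,
      next_item, List.head?]


-- ===== VERDICT (by name: the statement is the Claim_ definition above) =====
theorem next_item_spec : Claim_equal_next_item := by
  intro xs item _
  unfold Spec_next_item next_item_alt
  rw [fold_state]
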